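-- pv_equiv track=rewrite | github.com/ErnieWhite/AOC_Python | 2015/day01.py | part2
-- ===== SOURCE A (Python) =====
-- def part2(data):
--     """
--     Find the position of the first character that causes Santa
--     to enter the basement (floor -1).
--
--     Args:
--         data: Input data as string
--
--     Returns:
--         Position (1-indexed) of the first basement-causing character
--     """
--     floor = 0
--     for i, char in enumerate(data.strip(), 1):
--         if char == '(':
--             floor += 1
--         elif char == ')':
--             floor -= 1
--
--         if floor == -1:
--             return i
--     return -1
-- ===== SOURCE B (Python) =====
-- def part2(data):
--     """
--     Find the position of the first character that causes Santa
--     to enter the basement (floor -1).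
--
--     Two-pass: build the full running-floor prefix-sum list, then
--     look up the first occurrence of -1.
--     """
--     floors = []
--     total = 0
--     for char in data.strip():
--         total += 1 if char == '(' else -1 if char == ')' else 0
--         floors.append(total)
--     try:
--         return floors.index(-1) + 1
--     except ValueError:
--         return -1
-- ===== Notes on version B (the rewrite author's own statement) =====
-- stated objective: alternative
-- what changed: A's fused early-exit loop is split into two passes: build the complete running-floor prefix-sum list, then search it with list.index for the first -1.
import Mathlib
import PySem

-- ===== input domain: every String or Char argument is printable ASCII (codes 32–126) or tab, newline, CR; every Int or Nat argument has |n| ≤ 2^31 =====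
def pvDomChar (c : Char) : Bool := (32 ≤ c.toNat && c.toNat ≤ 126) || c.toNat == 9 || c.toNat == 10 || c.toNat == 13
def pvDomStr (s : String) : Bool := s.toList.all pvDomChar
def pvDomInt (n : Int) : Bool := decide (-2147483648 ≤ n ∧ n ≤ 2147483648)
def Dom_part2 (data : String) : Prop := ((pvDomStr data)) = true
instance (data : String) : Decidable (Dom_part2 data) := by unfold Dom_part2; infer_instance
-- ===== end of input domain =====

-- B differs from A by decomposition: A fuses the running floor with an early return,
-- B builds the full prefix-sum list and then searches it for -1.

-- ===== PORT A =====
-- A's loop over enumerate(data.strip(), 1) with early return, as structural recursion.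
def part2Go : List Char → Int → Int → Int
  | [], _, _ => -1
  | c :: cs, i, floor =>
    let floor' := if c = '(' then floor + 1 else if c = ')' then floor - 1 else floor
    if floor' = -1 then i else part2Go cs (i + 1) floor'

def part2 (data : String) : Int := part2Go (PySem.Str.strip data).toList 1 0

-- ===== PORT B =====
-- B's first pass: foldl appending each running total to the floors list.
def part2_alt (data : String) : Int :=
  let st := (PySem.Str.strip data).toList.foldl
      (fun (p : Int × List Int) c =>
        let t := p.1 + (if c = '(' then (1 : Int) else if c = ')' then -1 else 0)
        (t, p.2 ++ [t])) ((0 : Int), ([] : List Int))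
  match PySem.List.index? st.2 (-1 : Int) with
  | some k => (k : Int) + 1
  | none => -1

-- ===== PRECONDITION & SPEC =====
def Spec_part2 (data : String) (out : Int) : Prop := out = part2_alt data
instance (data : String) (out : Int) : Decidable (Spec_part2 data out) := by unfold Spec_part2; infer_instance

-- ===== CLAIM (what is proved, stated in full; the proofs are below) =====
def Claim_equal_part2 : Prop := ∀ (data : String), Dom_part2 data → Spec_part2 data (part2 data)

-- ===== LEMMAS AND PROOFS =====

-- simple recursive form of the prefix-sum list
def pvPf : List Char → Int → List Int
  | [], _ => []
  | c :: cs, t =>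
    let t' := t + (if c = '(' then (1 : Int) else if c = ')' then -1 else 0)
    t' :: pvPf cs t'

theorem pvFold_eq (cs : List Char) : ∀ (t : Int) (acc : List Int),
    (cs.foldl (fun (p : Int × List Int) c =>
        let t := p.1 + (if c = '(' then (1 : Int) else if c = ')' then -1 else 0)
        (t, p.2 ++ [t])) (t, acc)).2 = acc ++ pvPf cs t := by
  induction cs with
  | nil => intro t acc; simp [pvPf]
  | cons c cs ih =>
    intro t acc
    simp only [List.foldl_cons, pvPf, ih]
    simp

theorem pvMain (cs : List Char) : ∀ (floor i : Int),
    part2Go cs i floor =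
      (match PySem.List.index? (pvPf cs floor) (-1 : Int) with
       | some k => (k : Int) + i
       | none => -1) := by
  induction cs with
  | nil => intro floor i; simp [part2Go, pvPf, PySem.List.index?]
  | cons c cs ih =>
    intro floor i
    have hfl : (if c = '(' then floor + 1 else if c = ')' then floor - 1 else floor)
        = floor + (if c = '(' then (1 : Int) else if c = ')' then -1 else 0) := by
      split_ifs <;> ring
    set t' := floor + (if c = '(' then (1 : Int) else if c = ')' then -1 else 0) with ht'
    by_cases h : t' = -1
    · have : PySem.List.index? (pvPf (c :: cs) floor) (-1 : Int) = some 0 := by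
        simp only [pvPf]
        rw [← ht', h]
        exact PySem.List.index?_cons_self _ _
      simp only [part2Go, hfl, ← ht', h, if_pos rfl, this]
      simp
    · have hne : t' ≠ (-1 : Int) := h
      have hidx : PySem.List.index? (pvPf (c :: cs) floor) (-1 : Int)
          = (PySem.List.index? (pvPf cs t') (-1 : Int)).map (· + 1) := by
        simp only [pvPf, ← ht']
        exact PySem.List.index?_cons_of_ne _ hne
      simp only [part2Go, hfl, ← ht', if_neg h, hidx, ih t' (i + 1)]
      cases PySem.List.index? (pvPf cs t') (-1 : Int) with
      | none => simp
      | some k => simp [Option.map]; push_cast; ring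

-- ===== VERDICT (by name: the statement is the Claim_ definition above) =====
theorem part2_spec : Claim_equal_part2 := by
  intro data _
  unfold Spec_part2 part2 part2_alt
  rw [pvMain]
  simp only [pvFold_eq, List.nil_append]
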